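-- pv_equiv track=rewrite | github.com/Cookie98101/wechatcoze | doudian/DouDian.py | _split_text_chunks
-- ===== SOURCE A (Python) =====
-- def _split_text_chunks(msg, max_len=400):
--     text = (msg or '').strip()
--     if not text:
--         return []
--     if len(text) <= max_len:
--         return [text]
--     chunks = []
--     buf = ''
--     split_chars = set('。！？!?；;，,\n')
--     for ch in text:
--         buf += ch
--         if len(buf) >= max_len:
--             cut = -1
--             for i in range(len(buf) - 1, int(max_len * 0.6), -1):
--                 if buf[i] in split_chars:
--                     cut = i + 1
--                     break
--             if cut == -1:
--                 cut = max_len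
--             chunks.append(buf[:cut].strip())
--             buf = buf[cut:]
--     if buf.strip():
--         chunks.append(buf.strip())
--     return [c for c in chunks if c]
-- ===== SOURCE B (Python) =====
-- def _split_text_chunks(msg, max_len=400):
--     text = (msg or '').strip()
--     if not text:
--         return []
--     if len(text) <= max_len:
--         return [text]
--     split_chars = set('。！？!?；;，,\n')
--     low = int(max_len * 0.6)
--     res = []
--     start = 0
--     n = len(text)
--     while n - start >= max_len:
--         window = text[start:start + max_len]
--         cut = max_len
--         i = max_len - 1
--         while i > low:
--             if window[i] in split_chars:
--                 cut = i + 1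
--                 break
--             i -= 1
--         piece = window[:cut].strip()
--         if piece:
--             res.append(piece)
--         start += cut
--     tail = text[start:].strip()
--     if tail:
--         res.append(tail)
--     return res
-- ===== Notes on version B (the rewrite author's own statement) =====
-- stated objective: alternative
-- what changed: Replaces A's growing character buffer (append one char at a time, cut when it reaches max_len) by an absolute index pointer over the stripped text that slices each max_len window directly and appends only non-empty stripped pieces, with no trailing filter pass.
-- outside the precondition, e.g. on _split_text_chunks('a,b,c', -3): A returns ['a,', 'b,', 'c'], B does not finish within the time limit; on _split_text_chunks('hello world', 0): A returns ['hello world'], B does not finish within the time limit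
import Mathlib
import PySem

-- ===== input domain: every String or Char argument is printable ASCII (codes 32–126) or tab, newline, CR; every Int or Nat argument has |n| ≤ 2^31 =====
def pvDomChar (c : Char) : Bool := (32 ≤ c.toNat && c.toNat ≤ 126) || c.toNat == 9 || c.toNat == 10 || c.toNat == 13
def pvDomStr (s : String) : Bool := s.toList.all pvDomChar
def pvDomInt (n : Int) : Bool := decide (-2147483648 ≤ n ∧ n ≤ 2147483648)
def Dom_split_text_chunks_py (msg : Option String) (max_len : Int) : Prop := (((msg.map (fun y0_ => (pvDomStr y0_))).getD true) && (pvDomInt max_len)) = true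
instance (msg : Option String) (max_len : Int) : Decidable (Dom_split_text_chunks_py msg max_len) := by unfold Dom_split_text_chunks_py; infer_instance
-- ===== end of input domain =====

-- B replaces A's growing character buffer by an absolute index pointer over the stripped
-- text, slicing each max_len window directly and appending only non-empty pieces
-- (objective: alternative decomposition, same asymptotic cost).

-- ===== PORT A =====
-- the literal set('。！？!?；;，,\n')
def pvSplitChars : List Char := PySem.Set.ofList "。！？!?；;，,\n".toList

-- the inner 'for i in range(len(buf)-1, int(max_len*0.6), -1): … break' with
-- the following fallback 'if cut == -1: cut = max_len'.
-- int(max_len*0.6) is ported as floor(6*max_len/10): exact for 0 ≤ max_len ≤ 2^31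
-- (the double-rounding error of max_len*0.6 is below half an ulp there); Pre_ gives 1 ≤ max_len.
def pvCutA (max_len low : Int) (buf : List Char) : Int :=
  match (PySem.List.pyRange ((buf.length : Int) - 1) low (-1)).find?
      (fun i => PySem.Set.contains pvSplitChars (PySem.List.pyGetD buf i ' ')) with
  | some i => i + 1
  | none => max_len
  -- buf[i]: i is always in range here (0 ≤ low < i < len(buf)), so pyGetD is exact

-- the body of 'for ch in text' (state: chunks so far, buf)
def pvStepA (max_len low : Int) (st : List (List Char) × List Char) (ch : Char) :
    List (List Char) × List Char :=
  let buf := st.2 ++ [ch]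
  if max_len ≤ (buf.length : Int) then
    let cut := pvCutA max_len low buf
    (st.1 ++ [PySem.Chars.strip (PySem.List.slice buf none (some cut))],
     PySem.List.slice buf (some cut) none)
  else (st.1, buf)

def split_text_chunks_py (msg : Option String) (max_len : Int) : List String :=
  let text := PySem.Chars.strip ((msg.getD "").toList)
  if text.isEmpty then []
  else if (text.length : Int) ≤ max_len then [String.ofList text]
  else
    let low := PySem.Int.floordiv (6 * max_len) 10
    let st := text.foldl (pvStepA max_len low) ([], [])
    let chunks := if (PySem.Chars.strip st.2).isEmpty then st.1
                  else st.1 ++ [PySem.Chars.strip st.2]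
    (chunks.filter (fun c => !c.isEmpty)).map String.ofList

-- ===== PORT B =====
-- Source B's inner 'while i > low' scan: first i (going down) with window[i] a split char,
-- returning the cut i+1 (window[i] is always in range when called: i < len(window)).
def pvScanCut (window : List Char) (low i : Nat) : Option Nat :=
  if _h : low < i then
    if PySem.Set.contains pvSplitChars (window.getD i ' ') then some (i + 1)
    else pvScanCut window low (i - 1)
  else none
termination_by i

theorem pvScanCut_some_pos (window : List Char) (low i c : Nat)
    (h : pvScanCut window low i = some c) : 1 ≤ c := by
  induction i using Nat.strong_induction_on with
  | _ i ih =>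
    rw [pvScanCut] at h
    split at h
    · split at h
      · cases h; omega
      · exact ih (i - 1) (by omega) h
    · cases h

-- Source B's outer 'while n - start >= max_len' over s = text[start:]; the '1 ≤ maxLen'
-- conjunct is a termination guard only: under Pre_ it always holds (Source B's loop
-- would not terminate for max_len ≤ 0, which Pre_ excludes).
def pvAltLoop (maxLen low : Nat) (s : List Char) : List String :=
  if h : 1 ≤ maxLen ∧ maxLen ≤ s.length then
    let window := s.take maxLen
    let cut := (pvScanCut window low (maxLen - 1)).getD maxLen
    let piece := PySem.Chars.strip (window.take cut)
    (if piece.isEmpty then [] else [String.ofList piece]) ++ pvAltLoop maxLen low (s.drop cut)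
  else
    let tail := PySem.Chars.strip s
    if tail.isEmpty then [] else [String.ofList tail]
termination_by s.length
decreasing_by
  have hc : 1 ≤ (pvScanCut (List.take maxLen s) low (maxLen - 1)).getD maxLen := by
    cases hs : pvScanCut (List.take maxLen s) low (maxLen - 1) with
    | none => simpa using h.1
    | some c => simpa using pvScanCut_some_pos _ _ _ _ hs
  simp only [List.length_drop]
  omega

def split_text_chunks_py_alt (msg : Option String) (max_len : Int) : List String :=
  let text := PySem.Chars.strip ((msg.getD "").toList)
  if text.isEmpty then []
  else if (text.length : Int) ≤ max_len then [String.ofList text]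
  else
    pvAltLoop max_len.toNat (PySem.Int.floordiv (6 * max_len) 10).toNat text

-- ===== PRECONDITION & SPEC =====
-- Pre_ excludes non-positive max_len on non-whitespace input (outside the task's
-- natural domain): A's values there are accidents of negative slicing and B's
-- pointer loop does not terminate there; whitespace-only input stays admitted.
def Pre_split_text_chunks_py (msg : Option String) (max_len : Int) : Prop :=
  1 ≤ max_len ∨ (PySem.Chars.strip ((msg.getD "").toList)).isEmpty = true
instance (msg : Option String) (max_len : Int) : Decidable (Pre_split_text_chunks_py msg max_len) := by unfold Pre_split_text_chunks_py; infer_instance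

def pvWitness_split_text_chunks_py : Option String × Int := (some "hello, world! bye", 5)

def Spec_split_text_chunks_py (msg : Option String) (max_len : Int) (out : List String) : Prop := out = split_text_chunks_py_alt msg max_len
instance (msg : Option String) (max_len : Int) (out : List String) : Decidable (Spec_split_text_chunks_py msg max_len out) := by unfold Spec_split_text_chunks_py; infer_instance

-- ===== CLAIM (what is proved, stated in full; the proofs are below) =====
def Claim_equal_split_text_chunks_py : Prop := ∀ (msg : Option String) (max_len : Int), Dom_split_text_chunks_py msg max_len → Pre_split_text_chunks_py msg max_len → Spec_split_text_chunks_py msg max_len (split_text_chunks_py msg max_len)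

-- ===== LEMMAS AND PROOFS =====

-- finishing A's state: append the stripped buffer if non-empty, drop empties, stringify
def pvFinA (c : List (List Char)) (buf : List Char) : List String :=
  ((if (PySem.Chars.strip buf).isEmpty then c else c ++ [PySem.Chars.strip buf]).filter
    (fun x => !x.isEmpty)).map String.ofList

theorem pvFinA_eq (c : List (List Char)) (buf : List Char) :
    pvFinA c buf = (c.filter (fun x => !x.isEmpty)).map String.ofList ++
      (if (PySem.Chars.strip buf).isEmpty then []
       else [String.ofList (PySem.Chars.strip buf)]) := by
  unfold pvFinA
  split <;> simp_all

theorem pvScanCut_le (window : List Char) (low i c : Nat)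
    (h : pvScanCut window low i = some c) : c ≤ i + 1 := by
  induction i using Nat.strong_induction_on with
  | _ i ih =>
    rw [pvScanCut] at h
    split at h
    · split at h
      · cases h; omega
      · have := ih (i - 1) (by omega) h; omega
    · cases h

theorem pvFind_eq_scan (w : List Char) (low i : Nat) :
    (PySem.List.pyRange ((i : Nat) : Int) ((low : Nat) : Int) (-1)).find?
        (fun j => PySem.Set.contains pvSplitChars (PySem.List.pyGetD w j ' '))
      = (pvScanCut w low i).map (fun c => ((c : Int) - 1)) := by
  induction i using Nat.strong_induction_on with
  | _ i ih =>
    rw [pvScanCut]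
    by_cases hli : low < i
    · rw [PySem.List.pyRange_neg_one_cons (by exact_mod_cast hli)]
      by_cases hc : PySem.Set.contains pvSplitChars (w.getD i ' ') = true
      · rw [List.find?_cons_of_pos (by simpa using hc)]
        simp at hc
        simp [hli, hc]
      · rw [List.find?_cons_of_neg (by simpa using hc)]
        have hcast : ((i : Int) - 1) = (((i - 1 : Nat) : Nat) : Int) := by omega
        rw [hcast, ih (i - 1) (by omega)]
        simp at hc
        simp [hli, hc]
    · rw [PySem.List.pyRange_neg_one_eq_nil (by exact_mod_cast Nat.le_of_not_lt hli)]
      simp [hli]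

theorem pvCutA_eq (M low : Nat) (hM : 1 ≤ M) (w : List Char) (hw : w.length = M) :
    pvCutA (M : Int) ((low : Nat) : Int) w
      = (((pvScanCut w low (M - 1)).getD M : Nat) : Int) := by
  unfold pvCutA
  have h1 : ((w.length : Int) - 1) = (((M - 1 : Nat) : Nat) : Int) := by
    rw [hw]; omega
  rw [h1, pvFind_eq_scan]
  cases hs : pvScanCut w low (M - 1) with
  | none => simp
  | some c => simp

theorem pvCut_bounds (M low : Nat) (hM : 1 ≤ M) (w : List Char) :
    1 ≤ (pvScanCut w low (M - 1)).getD M ∧ (pvScanCut w low (M - 1)).getD M ≤ M := by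
  cases hs : pvScanCut w low (M - 1) with
  | none => simpa using hM
  | some c =>
    have h1 := pvScanCut_some_pos _ _ _ _ hs
    have h2 := pvScanCut_le _ _ _ _ hs
    simp only [Option.getD_some]
    omega

theorem pvBase (M low : Nat) (buf : List Char) (c : List (List Char)) (hbuf : buf.length < M) :
    pvFinA c buf = (c.filter (fun x => !x.isEmpty)).map String.ofList ++ pvAltLoop M low buf := by
  rw [pvFinA_eq, pvAltLoop, dif_neg (by omega)]

theorem pvMain (M low : Nat) (hM : 1 ≤ M) :
    ∀ (n : Nat) (rest buf : List Char) (c : List (List Char)),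
      rest.length ≤ n → buf.length < M →
      pvFinA (rest.foldl (pvStepA (M : Int) ((low : Nat) : Int)) (c, buf)).1
             (rest.foldl (pvStepA (M : Int) ((low : Nat) : Int)) (c, buf)).2
        = (c.filter (fun x => !x.isEmpty)).map String.ofList ++ pvAltLoop M low (buf ++ rest) := by
  intro n
  induction n with
  | zero =>
    intro rest buf c hlen hbuf
    have hr : rest = [] := List.eq_nil_of_length_eq_zero (by omega)
    subst hr
    simpa using pvBase M low buf c hbuf
  | succ n ih =>
    intro rest buf c hlen hbuf
    cases rest with
    | nil => simpa using pvBase M low buf c hbuf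
    | cons ch rest' =>
      simp only [List.foldl_cons]
      by_cases htr : (buf ++ [ch]).length = M
      · -- trigger step: the buffer has just reached length M
        have hstep : pvStepA (M : Int) ((low : Nat) : Int) (c, buf) ch
            = (c ++ [PySem.Chars.strip ((buf ++ [ch]).take ((pvScanCut (buf ++ [ch]) low (M - 1)).getD M))],
               (buf ++ [ch]).drop ((pvScanCut (buf ++ [ch]) low (M - 1)).getD M)) := by
          have hb := pvCut_bounds M low hM (buf ++ [ch])
          unfold pvStepA
          rw [if_pos (by rw [htr])]
          rw [pvCutA_eq M low hM (buf ++ [ch]) htr]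
          simp [PySem.List.slice_to_natCast, PySem.List.slice_from_natCast]
        rw [hstep]
        set w : List Char := buf ++ [ch] with hw
        set cut : Nat := (pvScanCut w low (M - 1)).getD M with hcut
        have hb := pvCut_bounds M low hM w
        rw [← hcut] at hb
        have hdl : (w.drop cut).length < M := by
          simp only [List.length_drop, htr]; omega
        rw [ih rest' (w.drop cut) _ (by simpa using hlen) hdl]
        -- unfold one step of pvAltLoop on the right
        have hsl : M ≤ (w ++ rest').length := by simp [htr]
        have hwin : (w ++ rest').take M = w := List.take_left' htr
        have hdrop : (w ++ rest').drop cut = w.drop cut ++ rest' :=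
          List.drop_append_of_le_length (by omega)
        conv_rhs => rw [show buf ++ ch :: rest' = w ++ rest' from by simp [hw], pvAltLoop]
        rw [dif_pos ⟨hM, hsl⟩]
        simp only [hwin, hdrop, ← hcut]
        simp [List.filter_append, List.append_assoc]
        by_cases hp : (PySem.Chars.strip (w.take cut)).isEmpty = true
        · simp [List.isEmpty_iff.mp hp]
        · simp [hp]
          intro hnil
          simp [hnil] at hp
      · -- no trigger: the buffer stays below M
        have hlt : (buf ++ [ch]).length < M := by
          simp only [List.length_append, List.length_cons, List.length_nil] at htr ⊢
          omega
        have hstep : pvStepA (M : Int) ((low : Nat) : Int) (c, buf) ch = (c, buf ++ [ch]) := by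
          unfold pvStepA
          rw [if_neg (by push_cast; omega)]
        rw [hstep, ih rest' (buf ++ [ch]) c (by simpa using hlen) hlt]
        simp

-- ===== VERDICT (by name: the statement is the Claim_ definition above) =====
theorem split_text_chunks_py_spec : Claim_equal_split_text_chunks_py := by
  intro msg max_len _hdom hpre
  unfold Spec_split_text_chunks_py split_text_chunks_py split_text_chunks_py_alt
  simp only []
  by_cases h1 : (PySem.Chars.strip ((msg.getD "").toList)).isEmpty
  · simp [h1]
  · have hpre' : 1 ≤ max_len := by
      rcases hpre with hpre | hpre
      · exact hpre
      · exact absurd hpre h1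
    simp only [h1, Bool.false_eq_true, if_false]
    by_cases h2 : ((PySem.Chars.strip ((msg.getD "").toList)).length : Int) ≤ max_len
    · simp [h2]
    · simp only [h2, if_false]
      set text := PySem.Chars.strip ((msg.getD "").toList) with htext
      set M : Nat := max_len.toNat with hM
      have hMi : ((M : Nat) : Int) = max_len := Int.toNat_of_nonneg (by omega)
      have hM1 : 1 ≤ M := by omega
      have hlow0 : 0 ≤ PySem.Int.floordiv (6 * max_len) 10 := by
        rw [PySem.Int.floordiv_eq_ediv_of_pos (by omega)]
        exact Int.ediv_nonneg (by omega) (by omega)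
      set lowN : Nat := (PySem.Int.floordiv (6 * max_len) 10).toNat with hlowN
      have hlowi : ((lowN : Nat) : Int) = PySem.Int.floordiv (6 * max_len) 10 :=
        Int.toNat_of_nonneg hlow0
      have hlowi2 : ((lowN : Nat) : Int) = PySem.Int.floordiv (6 * ((M : Nat) : Int)) 10 := by
        rw [hMi]; exact hlowi
      rw [← hMi, ← hlowi2]
      have := pvMain M lowN hM1 text.length text [] [] (le_refl _) (by simpa using hM1)
      simpa [pvFinA] using this
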